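-- pv_equiv track=rewrite | github.com/matthewglong/advent-of-code | 2023/day01/day01.py | fix_line
-- ===== SOURCE A (Python) =====
-- num_digits = '123456789'
--
-- str_digits = ['one', 'two', 'three', 'four', 'five', 'six', 'seven', 'eight',  'nine']
--
-- digi_map = dict(zip(str_digits, num_digits))
--
-- def fix_line(line):
--     nums = ''
--     while line:
--         if line[0] in num_digits:
--             nums += line[0]
--         else:
--             for str_digit in str_digits:
--                 if line.startswith(str_digit):
--                     nums += digi_map[str_digit]
--                     # line = line[len(str_digit)-1:] # str_digit overlap yes/no?
--                     break
--         line = line[1:]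
--     return nums
-- ===== SOURCE B (Python) =====
-- _PATTERNS = [(d, d) for d in '123456789'] + list(zip(
--     ['one', 'two', 'three', 'four', 'five', 'six', 'seven', 'eight', 'nine'],
--     '123456789'))
--
-- def fix_line(line):
--     # Stage 1: for each of the 18 patterns, collect every position where it occurs.
--     hits = []
--     for pat, d in _PATTERNS:
--         hits.extend((i, d) for i in range(len(line) - len(pat) + 1)
--                     if line.startswith(pat, i))
--     # Stage 2: order the hits left-to-right (positions are distinct: at most one
--     # pattern matches at any position) and emit their digits.
--     hits.sort(key=lambda h: h[0])
--     return ''.join(d for _, d in hits)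
-- ===== Notes on version B (the rewrite author's own statement) =====
-- stated objective: faster
-- what changed: A scans the line position by position, re-slicing line[1:] each step (quadratic) and looping over the nine words at each suffix; B is pattern-major and staged: for each of the 18 patterns it collects all occurrence positions in one pass over the intact string, then sorts the hits by position (positions are distinct since at most one pattern matches at any position) and joins the digits.
import Mathlib
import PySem

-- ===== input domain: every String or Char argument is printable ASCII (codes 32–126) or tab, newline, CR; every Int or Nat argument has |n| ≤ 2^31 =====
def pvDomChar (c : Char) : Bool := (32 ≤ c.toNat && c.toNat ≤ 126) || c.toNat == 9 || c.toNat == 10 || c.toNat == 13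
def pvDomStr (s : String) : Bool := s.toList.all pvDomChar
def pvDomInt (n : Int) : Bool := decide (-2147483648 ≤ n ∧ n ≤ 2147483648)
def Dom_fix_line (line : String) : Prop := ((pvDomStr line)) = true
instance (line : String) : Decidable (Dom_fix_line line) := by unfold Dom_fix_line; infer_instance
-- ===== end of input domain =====

-- B replaces A's position-by-position scan (digit test + first-matching-word inner loop at each
-- suffix) by a staged pattern-major pass: for each of the 18 patterns collect all its occurrence
-- positions, then sort the hits by position and join the digits (alternative decomposition).

-- ===== PORT A =====
def pvNumDigits : List Char := ['1','2','3','4','5','6','7','8','9']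

def pvStrDigits : List (List Char) :=
  [['o','n','e'], ['t','w','o'], ['t','h','r','e','e'], ['f','o','u','r'], ['f','i','v','e'],
   ['s','i','x'], ['s','e','v','e','n'], ['e','i','g','h','t'], ['n','i','n','e']]

def pvDigiMap : PySem.Dict (List Char) (List Char) :=
  PySem.Dict.ofList (List.zip pvStrDigits (pvNumDigits.map (fun c => [c])))

-- the inner 'for str_digit in str_digits: … break' loop; digi_map[str_digit] never misses
-- (every str_digit is a key of digi_map), so getD is exact here
def fixAInner (s : List Char) (nums : List Char) : List (List Char) → List Char
  | [] => nums
  | w :: ws =>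
    if PySem.Chars.startswith s w then nums ++ pvDigiMap.getD w []
    else fixAInner s nums ws

-- the outer 'while line:' loop
def fixALoop (s : List Char) (nums : List Char) : List Char :=
  match s with
  | [] => nums
  | c :: rest =>
    let nums' := if PySem.Chars.isIn [c] pvNumDigits then nums ++ [c]
                 else fixAInner (c :: rest) nums pvStrDigits
    fixALoop rest nums'

def fix_line (line : String) : String := String.ofList (fixALoop line.toList [])

-- ===== PORT B =====
-- _PATTERNS: the nine digit characters (mapping to themselves) followed by the nine words
def pvPatterns : List (List Char × Char) :=
  [(['1'], '1'), (['2'], '2'), (['3'], '3'), (['4'], '4'), (['5'], '5'),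
   (['6'], '6'), (['7'], '7'), (['8'], '8'), (['9'], '9'),
   (['o','n','e'], '1'), (['t','w','o'], '2'), (['t','h','r','e','e'], '3'),
   (['f','o','u','r'], '4'), (['f','i','v','e'], '5'), (['s','i','x'], '6'),
   (['s','e','v','e','n'], '7'), (['e','i','g','h','t'], '8'), (['n','i','n','e'], '9')]

-- 'line.startswith(pat, i)' for 0 ≤ i (the only i produced by range) is exactly
-- startswith on the suffix dropped at i, so Chars.startswith ∘ List.drop is exact here
def fix_line_alt (line : String) : String :=
  let s := line.toList
  let hits := pvPatterns.foldl
    (fun acc p =>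
      acc ++ ((PySem.List.pyRange 0 ((s.length : Int) - p.1.length + 1) 1).filter
        (fun i => PySem.Chars.startswith (s.drop i.toNat) p.1)).map (fun i => (i, p.2))) []
  String.ofList ((PySem.List.sorted hits (fun h => h.1) false).map (fun h => h.2))

-- ===== PRECONDITION & SPEC =====
def Spec_fix_line (line : String) (out : String) : Prop := out = fix_line_alt line
instance (line : String) (out : String) : Decidable (Spec_fix_line line out) := by unfold Spec_fix_line; infer_instance

-- ===== CLAIM (what is proved, stated in full; the proofs are below) =====
def Claim_equal_fix_line : Prop := ∀ (line : String), Dom_fix_line line → Spec_fix_line line (fix_line line)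

-- ===== LEMMAS AND PROOFS =====

-- the token A appends while looking at the suffix t of the line
def aTok : List Char → List Char
  | [] => []
  | c :: rest =>
    if PySem.Chars.isIn [c] pvNumDigits then [c] else fixAInner (c :: rest) [] pvStrDigits

-- B's per-position view: the digits of all patterns matching at the head of the suffix t
def patsAt (t : List Char) : List Char :=
  pvPatterns.flatMap (fun p => if PySem.Chars.startswith t p.1 then [p.2] else [])

lemma sw_eq (t w : List Char) : PySem.Chars.startswith t w = decide (t.take w.length = w) := by
  have h := PySem.Chars.startswith_iff (s := t) (p := w)
  rcases hb : PySem.Chars.startswith t w with _ | _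
  · symm; simp only [decide_eq_false_iff_not]
    intro he
    exact absurd (h.mpr (List.prefix_iff_eq_take.mpr he.symm)) (by simp [hb])
  · symm; simp only [decide_eq_true_eq]
    exact (List.prefix_iff_eq_take.mp (h.mp hb)).symm

lemma sw' (t w : List Char) (n : ℕ) (hn : w.length = n) :
    PySem.Chars.startswith t w = decide (t.take n = w) := by rw [sw_eq, hn]

lemma digit_eq (c : Char) :
    PySem.Chars.isIn [c] pvNumDigits = decide ('1' ≤ c ∧ c ≤ '9') := by
  rcases hb : PySem.Chars.isIn [c] pvNumDigits with _ | _
  · symm; simp only [decide_eq_false_iff_not]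
    rintro ⟨h1, h9⟩
    have hmem : c ∈ pvNumDigits := by
      have hn1 : 49 ≤ c.toNat := h1
      have hn9 : c.toNat ≤ 57 := h9
      interval_cases h : c.toNat <;>
        · have hc := Char.ofNat_toNat c
          rw [h] at hc
          rw [← hc]
          decide
    rcases List.append_of_mem hmem with ⟨l1, l2, hsplit⟩
    have : PySem.Chars.isIn [c] pvNumDigits = true :=
      (PySem.Chars.isIn_iff_infix _ _).mpr ⟨l1, l2, by simp [hsplit]⟩
    simp [hb] at this
  · symm; simp only [decide_eq_true_eq]
    have hmem : c ∈ pvNumDigits :=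
      ((PySem.Chars.isIn_iff_infix _ _).mp hb).subset (List.mem_singleton_self c)
    fin_cases hmem <;> exact ⟨by decide, by decide⟩

lemma take_of_take (t : List Char) (m n : ℕ) (hmn : m ≤ n) (w : List Char)
    (h : t.take n = w) : t.take m = w.take m := by
  have h' := congrArg (List.take m) h
  rwa [List.take_take, Nat.min_eq_left hmn] at h'

-- at most one digit word can match at a given position: no word is a truncation of another
lemma excl (t w w' : List Char) (n n' : ℕ) (hn : w.length = n) (hn' : w'.length = n')
    (h : t.take n = w) (hne : ¬ (w.take n' = w' ∨ w'.take n = w)) :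
    ¬ t.take n' = w' := by
  subst hn hn'
  intro h'
  rcases le_total w'.length w.length with hle | hle
  · exact hne (Or.inl ((take_of_take t w'.length w.length hle w h).symm.trans h'))
  · exact hne (Or.inr ((take_of_take t w.length w'.length hle w' h').symm.trans h))

lemma gd1 : pvDigiMap.getD ['o','n','e'] [] = ['1'] := by decide
lemma gd2 : pvDigiMap.getD ['t','w','o'] [] = ['2'] := by decide
lemma gd3 : pvDigiMap.getD ['t','h','r','e','e'] [] = ['3'] := by decide
lemma gd4 : pvDigiMap.getD ['f','o','u','r'] [] = ['4'] := by decide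
lemma gd5 : pvDigiMap.getD ['f','i','v','e'] [] = ['5'] := by decide
lemma gd6 : pvDigiMap.getD ['s','i','x'] [] = ['6'] := by decide
lemma gd7 : pvDigiMap.getD ['s','e','v','e','n'] [] = ['7'] := by decide
lemma gd8 : pvDigiMap.getD ['e','i','g','h','t'] [] = ['8'] := by decide
lemma gd9 : pvDigiMap.getD ['n','i','n','e'] [] = ['9'] := by decide

-- the digits of the patterns matching at a position are exactly A's token there
lemma patsAt_eq (t : List Char) : patsAt t = aTok t := by
  cases t with
  | nil => decide
  | cons c rest =>
    simp only [patsAt, pvPatterns, List.flatMap_cons, List.flatMap_nil, List.append_nil, aTok,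
      digit_eq,
      sw' _ ['1'] 1 rfl, sw' _ ['2'] 1 rfl, sw' _ ['3'] 1 rfl, sw' _ ['4'] 1 rfl,
      sw' _ ['5'] 1 rfl, sw' _ ['6'] 1 rfl, sw' _ ['7'] 1 rfl, sw' _ ['8'] 1 rfl,
      sw' _ ['9'] 1 rfl,
      sw' _ ['o','n','e'] 3 rfl, sw' _ ['t','w','o'] 3 rfl, sw' _ ['t','h','r','e','e'] 5 rfl,
      sw' _ ['f','o','u','r'] 4 rfl, sw' _ ['f','i','v','e'] 4 rfl, sw' _ ['s','i','x'] 3 rfl,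
      sw' _ ['s','e','v','e','n'] 5 rfl, sw' _ ['e','i','g','h','t'] 5 rfl,
      sw' _ ['n','i','n','e'] 4 rfl, decide_eq_true_eq]
    by_cases hd : '1' ≤ c ∧ c ≤ '9'
    · -- a digit position: no word matches (its first character is a letter)
      have hno : c ≠ 'o' := by rintro rfl; exact absurd hd (by decide)
      have hnt : c ≠ 't' := by rintro rfl; exact absurd hd (by decide)
      have hnf : c ≠ 'f' := by rintro rfl; exact absurd hd (by decide)
      have hns : c ≠ 's' := by rintro rfl; exact absurd hd (by decide)
      have hne : c ≠ 'e' := by rintro rfl; exact absurd hd (by decide)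
      have hnn : c ≠ 'n' := by rintro rfl; exact absurd hd (by decide)
      rw [if_pos hd]
      simp only [List.take_succ_cons, List.take_zero, List.cons_eq_cons, hno, hnt, hnf, hns,
        hne, hnn, false_and, if_false]
      obtain ⟨h1, h9⟩ := hd
      have hn1 : 49 ≤ c.toNat := h1
      have hn9 : c.toNat ≤ 57 := h9
      interval_cases h : c.toNat <;>
        · have hc := Char.ofNat_toNat c
          rw [h] at hc
          subst hc
          decide
    · -- not a digit: the nine digit patterns are dead, the word scan remains
      have k1 : ¬ (c :: rest).take 1 = ['1'] := by simp; rintro rfl; exact hd (by decide)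
      have k2 : ¬ (c :: rest).take 1 = ['2'] := by simp; rintro rfl; exact hd (by decide)
      have k3 : ¬ (c :: rest).take 1 = ['3'] := by simp; rintro rfl; exact hd (by decide)
      have k4 : ¬ (c :: rest).take 1 = ['4'] := by simp; rintro rfl; exact hd (by decide)
      have k5 : ¬ (c :: rest).take 1 = ['5'] := by simp; rintro rfl; exact hd (by decide)
      have k6 : ¬ (c :: rest).take 1 = ['6'] := by simp; rintro rfl; exact hd (by decide)
      have k7 : ¬ (c :: rest).take 1 = ['7'] := by simp; rintro rfl; exact hd (by decide)
      have k8 : ¬ (c :: rest).take 1 = ['8'] := by simp; rintro rfl; exact hd (by decide)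
      have k9 : ¬ (c :: rest).take 1 = ['9'] := by simp; rintro rfl; exact hd (by decide)
      rw [if_neg hd]
      simp only [k1, k2, k3, k4, k5, k6, k7, k8, k9, if_false, List.nil_append]
      simp only [pvStrDigits, fixAInner, List.nil_append,
        sw' _ ['o','n','e'] 3 rfl, sw' _ ['t','w','o'] 3 rfl, sw' _ ['t','h','r','e','e'] 5 rfl,
        sw' _ ['f','o','u','r'] 4 rfl, sw' _ ['f','i','v','e'] 4 rfl, sw' _ ['s','i','x'] 3 rfl,
        sw' _ ['s','e','v','e','n'] 5 rfl, sw' _ ['e','i','g','h','t'] 5 rfl,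
        sw' _ ['n','i','n','e'] 4 rfl, decide_eq_true_eq]
      set t := c :: rest with ht
      by_cases h1 : t.take 3 = ['o','n','e']
      · have e2 := excl t ['o','n','e'] ['t','w','o'] 3 3 rfl rfl h1 (by decide)
        have e3 := excl t ['o','n','e'] ['t','h','r','e','e'] 3 5 rfl rfl h1 (by decide)
        have e4 := excl t ['o','n','e'] ['f','o','u','r'] 3 4 rfl rfl h1 (by decide)
        have e5 := excl t ['o','n','e'] ['f','i','v','e'] 3 4 rfl rfl h1 (by decide)
        have e6 := excl t ['o','n','e'] ['s','i','x'] 3 3 rfl rfl h1 (by decide)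
        have e7 := excl t ['o','n','e'] ['s','e','v','e','n'] 3 5 rfl rfl h1 (by decide)
        have e8 := excl t ['o','n','e'] ['e','i','g','h','t'] 3 5 rfl rfl h1 (by decide)
        have e9 := excl t ['o','n','e'] ['n','i','n','e'] 3 4 rfl rfl h1 (by decide)
        simp [h1, e3, e4, e5, e7, e8, e9, gd1]
      by_cases h2 : t.take 3 = ['t','w','o']
      · have e3 := excl t ['t','w','o'] ['t','h','r','e','e'] 3 5 rfl rfl h2 (by decide)
        have e4 := excl t ['t','w','o'] ['f','o','u','r'] 3 4 rfl rfl h2 (by decide)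
        have e5 := excl t ['t','w','o'] ['f','i','v','e'] 3 4 rfl rfl h2 (by decide)
        have e6 := excl t ['t','w','o'] ['s','i','x'] 3 3 rfl rfl h2 (by decide)
        have e7 := excl t ['t','w','o'] ['s','e','v','e','n'] 3 5 rfl rfl h2 (by decide)
        have e8 := excl t ['t','w','o'] ['e','i','g','h','t'] 3 5 rfl rfl h2 (by decide)
        have e9 := excl t ['t','w','o'] ['n','i','n','e'] 3 4 rfl rfl h2 (by decide)
        simp [h2, e3, e4, e5, e7, e8, e9, gd2]
      by_cases h3 : t.take 5 = ['t','h','r','e','e']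
      · have e4 := excl t ['t','h','r','e','e'] ['f','o','u','r'] 5 4 rfl rfl h3 (by decide)
        have e5 := excl t ['t','h','r','e','e'] ['f','i','v','e'] 5 4 rfl rfl h3 (by decide)
        have e6 := excl t ['t','h','r','e','e'] ['s','i','x'] 5 3 rfl rfl h3 (by decide)
        have e7 := excl t ['t','h','r','e','e'] ['s','e','v','e','n'] 5 5 rfl rfl h3 (by decide)
        have e8 := excl t ['t','h','r','e','e'] ['e','i','g','h','t'] 5 5 rfl rfl h3 (by decide)
        have e9 := excl t ['t','h','r','e','e'] ['n','i','n','e'] 5 4 rfl rfl h3 (by decide)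
        simp [h1, h2, h3, e4, e5, e6, e9, gd3]
      by_cases h4 : t.take 4 = ['f','o','u','r']
      · have e5 := excl t ['f','o','u','r'] ['f','i','v','e'] 4 4 rfl rfl h4 (by decide)
        have e6 := excl t ['f','o','u','r'] ['s','i','x'] 4 3 rfl rfl h4 (by decide)
        have e7 := excl t ['f','o','u','r'] ['s','e','v','e','n'] 4 5 rfl rfl h4 (by decide)
        have e8 := excl t ['f','o','u','r'] ['e','i','g','h','t'] 4 5 rfl rfl h4 (by decide)
        have e9 := excl t ['f','o','u','r'] ['n','i','n','e'] 4 4 rfl rfl h4 (by decide)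
        simp [h1, h2, h3, h4, e6, e7, e8, gd4]
      by_cases h5 : t.take 4 = ['f','i','v','e']
      · have e6 := excl t ['f','i','v','e'] ['s','i','x'] 4 3 rfl rfl h5 (by decide)
        have e7 := excl t ['f','i','v','e'] ['s','e','v','e','n'] 4 5 rfl rfl h5 (by decide)
        have e8 := excl t ['f','i','v','e'] ['e','i','g','h','t'] 4 5 rfl rfl h5 (by decide)
        have e9 := excl t ['f','i','v','e'] ['n','i','n','e'] 4 4 rfl rfl h5 (by decide)
        simp [h1, h2, h3, h5, e6, e7, e8, gd5]
      by_cases h6 : t.take 3 = ['s','i','x']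
      · have e7 := excl t ['s','i','x'] ['s','e','v','e','n'] 3 5 rfl rfl h6 (by decide)
        have e8 := excl t ['s','i','x'] ['e','i','g','h','t'] 3 5 rfl rfl h6 (by decide)
        have e9 := excl t ['s','i','x'] ['n','i','n','e'] 3 4 rfl rfl h6 (by decide)
        simp [h3, h4, h5, h6, e7, e8, e9, gd6]
      by_cases h7 : t.take 5 = ['s','e','v','e','n']
      · have e8 := excl t ['s','e','v','e','n'] ['e','i','g','h','t'] 5 5 rfl rfl h7 (by decide)
        have e9 := excl t ['s','e','v','e','n'] ['n','i','n','e'] 5 4 rfl rfl h7 (by decide)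
        simp [h1, h2, h4, h5, h6, h7, e9, gd7]
      by_cases h8 : t.take 5 = ['e','i','g','h','t']
      · have e9 := excl t ['e','i','g','h','t'] ['n','i','n','e'] 5 4 rfl rfl h8 (by decide)
        simp [h1, h2, h4, h5, h6, h8, e9, gd8]
      by_cases h9 : t.take 4 = ['n','i','n','e']
      · simp [h1, h2, h3, h6, h7, h8, h9, gd9]
      simp [h1, h2, h3, h4, h5, h6, h7, h8, h9]

lemma fixAInner_append (s : List Char) (nums : List Char) (ws : List (List Char)) :
    fixAInner s nums ws = nums ++ fixAInner s [] ws := by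
  induction ws with
  | nil => simp [fixAInner]
  | cons w ws ih => by_cases h : PySem.Chars.startswith s w <;> simp [fixAInner, h, ih]

lemma fixALoop_eq (s : List Char) (nums : List Char) :
    fixALoop s nums = nums ++ ((List.range s.length).map (fun k => aTok (s.drop k))).flatten := by
  induction s generalizing nums with
  | nil => simp [fixALoop]
  | cons c rest ih =>
    have hstep : (if PySem.Chars.isIn [c] pvNumDigits then nums ++ [c]
        else fixAInner (c :: rest) nums pvStrDigits) = nums ++ aTok (c :: rest) := by
      by_cases h : PySem.Chars.isIn [c] pvNumDigits
      · simp [aTok, h]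
      · rw [if_neg h, fixAInner_append, aTok, if_neg h]
    simp only [fixALoop]
    rw [hstep, ih]
    simp [List.range_succ_eq_map, List.map_map, Function.comp_def, List.drop_succ_cons,
      List.append_assoc]

lemma aTok_len (t : List Char) : (aTok t).length ≤ 1 := by
  cases t with
  | nil => simp [aTok]
  | cons c rest =>
    by_cases h : PySem.Chars.isIn [c] pvNumDigits
    · simp [aTok, h]
    · rw [aTok, if_neg h]
      simp only [pvStrDigits, fixAInner, List.nil_append]
      split_ifs <;> decide

-- filter-then-map expressed as a flatMap of conditional singletons
lemma filter_map_flatMap {α β : Type} (l : List α) (q : α → Bool) (f : α → β) :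
    (l.filter q).map f = l.flatMap (fun k => if q k then [f k] else []) := by
  induction l with
  | nil => rfl
  | cons x t ih => by_cases h : q x <;> simp [h, ih]

-- a flatMap of pointwise appends splits, up to permutation
lemma flatMap_append_perm {α β : Type} (l : List α) (g h : α → List β) :
    (l.flatMap fun b => g b ++ h b).Perm (l.flatMap g ++ l.flatMap h) := by
  induction l with
  | nil => simp
  | cons b u ih =>
    simp only [List.flatMap_cons]
    refine (List.Perm.append_left _ ih).trans ?_
    simp only [List.append_assoc]
    exact List.Perm.append_left _ (List.perm_append_comm_assoc _ _ _)

-- exchanging the two levels of a double flatMap is a permutation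
lemma flatMap_swap_perm {α β γ : Type} (l1 : List α) (l2 : List β) (f : α → β → List γ) :
    (l1.flatMap fun a => l2.flatMap (f a)).Perm
      (l2.flatMap fun b => l1.flatMap (fun a => f a b)) := by
  induction l1 with
  | nil => simp
  | cons a t ih =>
    simp only [List.flatMap_cons]
    refine List.Perm.trans (List.Perm.append_left _ ih) ?_
    exact (flatMap_append_perm l2 (f a) (fun b => t.flatMap (fun a' => f a' b))).symm

-- per pattern: widening the scan range to the whole string changes nothing
lemma pattern_hits (s w : List Char) (d : Char) (hw : w ≠ []) :
    ((PySem.List.pyRange 0 ((s.length : Int) - w.length + 1) 1).filter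
        (fun i => PySem.Chars.startswith (s.drop i.toNat) w)).map (fun i => (i, d))
      = (List.range s.length).flatMap
          (fun k => if PySem.Chars.startswith (s.drop k) w then [((k : Int), d)] else []) := by
  have hwlen : 0 < w.length := List.length_pos_of_ne_nil hw
  have hlen : ∀ k : ℕ, PySem.Chars.startswith (s.drop k) w = true → k + w.length ≤ s.length := by
    intro k hk
    have hle := ((PySem.Chars.startswith_iff _ _).mp hk).length_le
    simp only [List.length_drop] at hle
    omega
  have hM : (((s.length : Int) - w.length + 1) - 0).toNat ≤ s.length := by omega
  rw [PySem.List.pyRange_one, List.filter_map, List.map_map, ← filter_map_flatMap]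
  have hsplit : List.range s.length
      = List.range (((s.length : Int) - w.length + 1) - 0).toNat
        ++ (List.range (s.length - (((s.length : Int) - w.length + 1) - 0).toNat)).map
            ((((s.length : Int) - w.length + 1) - 0).toNat + ·) := by
    rw [← List.range_add, Nat.add_sub_cancel' hM]
  rw [hsplit, List.filter_append]
  have hdead : (((List.range (s.length - (((s.length : Int) - w.length + 1) - 0).toNat)).map
      ((((s.length : Int) - w.length + 1) - 0).toNat + ·)).filter
        (fun k => PySem.Chars.startswith (s.drop k) w)) = [] := by
    rw [List.filter_eq_nil_iff]
    intro k hk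
    simp only [List.mem_map] at hk
    obtain ⟨j, hj, rfl⟩ := hk
    intro hsw
    have := hlen _ hsw
    omega
  rw [hdead, List.append_nil]
  simp [Function.comp_def]

-- ===== VERDICT (by name: the statement is the Claim_ definition above) =====
theorem fix_line_spec : Claim_equal_fix_line := by
  intro line _
  unfold Spec_fix_line
  have halt : fix_line_alt line = String.ofList ((PySem.List.sorted
      (pvPatterns.foldl
        (fun acc p =>
          acc ++ ((PySem.List.pyRange 0 ((line.toList.length : Int) - p.1.length + 1) 1).filter
            (fun i => PySem.Chars.startswith (line.toList.drop i.toNat) p.1)).map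
              (fun i => (i, p.2))) [])
      (fun h => h.1) false).map (fun h => h.2)) := rfl
  have ha : fix_line line = String.ofList
      (((List.range line.toList.length).map (fun k => aTok (line.toList.drop k))).flatten) := by
    rw [fix_line, fixALoop_eq, List.nil_append]
  rw [ha, halt]
  set s := line.toList with hs
  set posHits : List (Int × Char) :=
    (List.range s.length).flatMap (fun k => (aTok (s.drop k)).map (fun ch => ((k : Int), ch)))
    with hposHits
  have hhits : (pvPatterns.foldl
      (fun acc p =>
        acc ++ ((PySem.List.pyRange 0 ((s.length : Int) - p.1.length + 1) 1).filter
          (fun i => PySem.Chars.startswith (s.drop i.toNat) p.1)).map (fun i => (i, p.2))) [])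
      = pvPatterns.flatMap (fun p =>
          (List.range s.length).flatMap (fun k =>
            if PySem.Chars.startswith (s.drop k) p.1 then [((k : Int), p.2)] else [])) := by
    rw [PySem.List.foldl_append_eq_flatMap, List.nil_append]
    exact List.flatMap_congr (fun p hp => pattern_hits s p.1 p.2 (by fin_cases hp <;> decide))
  have hpos : (List.range s.length).flatMap (fun k =>
        pvPatterns.flatMap (fun p =>
          if PySem.Chars.startswith (s.drop k) p.1 then [((k : Int), p.2)] else []))
      = posHits := by
    rw [hposHits]
    refine List.flatMap_congr (fun k hk => ?_)
    rw [← patsAt_eq, patsAt, List.map_flatMap]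
    refine List.flatMap_congr (fun p hp => ?_)
    rw [apply_ite (List.map (fun ch => ((k : Int), ch)))]
    rfl
  have hperm : posHits.Perm (pvPatterns.foldl
      (fun acc p =>
        acc ++ ((PySem.List.pyRange 0 ((s.length : Int) - p.1.length + 1) 1).filter
          (fun i => PySem.Chars.startswith (s.drop i.toNat) p.1)).map (fun i => (i, p.2))) []) := by
    rw [hhits, ← hpos]
    exact (flatMap_swap_perm pvPatterns (List.range s.length)
      (fun p k => if PySem.Chars.startswith (s.drop k) p.1 then [((k : Int), p.2)] else [])).symm
  have hpw : posHits.Pairwise (fun a b => a.1 < b.1) := by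
    rw [hposHits, List.pairwise_flatMap]
    constructor
    · intro k hk
      have hl := aTok_len (s.drop k)
      rcases h : aTok (s.drop k) with _ | ⟨x, _ | ⟨y, t⟩⟩
      · simp
      · simp
      · rw [h] at hl; simp at hl
    · refine List.Pairwise.imp_of_mem ?_ List.pairwise_lt_range
      intro k j hk hj hlt x hx y hy
      simp only [List.mem_map] at hx hy
      obtain ⟨_, _, rfl⟩ := hx
      obtain ⟨_, _, rfl⟩ := hy
      simpa using hlt
  have hfin : posHits.map (fun h => h.2)
      = ((List.range s.length).map (fun k => aTok (s.drop k))).flatten := by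
    rw [hposHits, List.map_flatMap, List.flatMap_def]
    refine congrArg List.flatten (List.map_congr_left (fun k hk => ?_))
    simp [List.map_map]
  rw [PySem.List.sorted_eq_of_perm_of_pairwise_lt _ posHits (fun h => h.1) hperm hpw, hfin]
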